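-- pv_equiv track=rewrite | github.com/sangjun97/algorithm | 프로그래머스/lv2/76502. 괄호 회전하기/괄호 회전하기.py | solution
-- ===== SOURCE A (Python) =====
-- from collections import deque
--
-- def solution(s):
--     answer = 0
--     lst=['[]','{}','()']
--     s = deque(s)
--     for i in range(len(s)):
--         s.rotate(-1)
--         a=deque()
--         for j in s:
--             if a:
--                 if a[-1]=='[' and j==']':
--                     a.pop()
--                 elif a[-1]=='(' and j==')':
--                     a.pop()
--                 elif a[-1]=='{' and j=='}':
--                     a.pop()
--                 else:
--                     a.append(j)
--             else:
--                 a.append(j)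
--         if len(a)==0:
--             answer+=1
--
--     return answer
-- ===== SOURCE B (Python) =====
-- def solution(s):
--     n = len(s)
--     answer = 0
--     for i in range(n):
--         t = s[i:] + s[:i]
--         while '[]' in t or '{}' in t or '()' in t:
--             t = t.replace('[]', '').replace('{}', '').replace('()', '')
--         if t == '':
--             answer += 1
--     return answer
-- ===== Notes on version B (the rewrite author's own statement) =====
-- stated objective: faster
-- what changed: Each rotation is built by slicing instead of deque rotation, and validated by repeatedly deleting all adjacent matched bracket pairs with str.replace until none remains (count if the residue is empty), replacing A's explicit per-character stack scan.
import Mathlib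
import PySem

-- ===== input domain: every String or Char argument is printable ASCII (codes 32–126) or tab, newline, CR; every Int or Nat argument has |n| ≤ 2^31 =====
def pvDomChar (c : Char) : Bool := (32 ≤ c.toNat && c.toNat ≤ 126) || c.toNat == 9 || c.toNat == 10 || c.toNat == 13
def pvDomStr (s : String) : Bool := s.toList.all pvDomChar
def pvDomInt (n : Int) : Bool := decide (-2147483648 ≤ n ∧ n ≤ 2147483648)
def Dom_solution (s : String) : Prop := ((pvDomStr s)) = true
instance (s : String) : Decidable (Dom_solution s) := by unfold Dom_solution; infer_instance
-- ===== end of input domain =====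

-- B validates each rotation by repeated matched-pair elimination instead of A's deque/stack scan; objective: simpler.

-- ===== PORT A =====
-- inner loop body: deque 'a' with top at the end (a[-1] = getLast?, pop = dropLast, append = ++ [j])
def stepA (a : List Char) (j : Char) : List Char :=
  if a ≠ [] then
    if a.getLast? = some '[' ∧ j = ']' then a.dropLast
    else if a.getLast? = some '(' ∧ j = ')' then a.dropLast
    else if a.getLast? = some '{' ∧ j = '}' then a.dropLast
    else a ++ [j]
  else a ++ [j]

-- s.rotate(-1): move the first element to the end
def rotA (l : List Char) : List Char :=
  match l with
  | [] => []
  | x :: xs => xs ++ [x]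

def solution (s : String) : Int :=
  let d0 := s.toList
  let res := (List.range d0.length).foldl
    (fun (st : List Char × Int) (_ : Nat) =>
      let d := rotA st.1
      let a := d.foldl stepA ([] : List Char)
      (d, if a.length = 0 then st.2 + 1 else st.2))
    (d0, 0)
  res.2

-- ===== PORT B =====
-- t.replace(ab, ''): Python's left-to-right non-overlapping replacement of the 2-char pattern
def replacePair (a b : Char) : List Char → List Char
  | [] => []
  | [x] => [x]
  | x :: y :: rest =>
    if x = a ∧ y = b then replacePair a b rest
    else x :: replacePair a b (y :: rest)

-- 'ab' in t for a 2-char pattern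
def hasPair2 (a b : Char) : List Char → Bool
  | [] => false
  | [_] => false
  | x :: y :: rest => if x = a ∧ y = b then true else hasPair2 a b (y :: rest)

def reduce3 (t : List Char) : List Char :=
  replacePair '(' ')' (replacePair '{' '}' (replacePair '[' ']' t))

def hasAny (t : List Char) : Bool :=
  hasPair2 '[' ']' t || hasPair2 '{' '}' t || hasPair2 '(' ')' t

-- the while-loop; fuel t.length suffices since each pass strictly shrinks t
def reduceLoop : Nat → List Char → List Char
  | 0, t => t
  | f + 1, t => if hasAny t then reduceLoop f (reduce3 t) else t

def solution_alt (s : String) : Int :=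
  let l := s.toList
  (List.range l.length).foldl
    (fun (answer : Int) (i : Nat) =>
      let t := l.drop i ++ l.take i
      let r := reduceLoop t.length t
      if r = [] then answer + 1 else answer)
    0

-- ===== PRECONDITION & SPEC =====
def Spec_solution (s : String) (out : Int) : Prop := out = solution_alt s
instance (s : String) (out : Int) : Decidable (Spec_solution s out) := by unfold Spec_solution; infer_instance

-- ===== CLAIM (what is proved, stated in full; the proofs are below) =====
def Claim_equal_solution : Prop := ∀ (s : String), Dom_solution s → Spec_solution s (solution s)

-- ===== LEMMAS AND PROOFS =====

-- pushing anything that is not a matching closer of the top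
lemma step_push (st : List Char) (o : Char) (h1 : o ≠ ']') (h2 : o ≠ ')') (h3 : o ≠ '}') :
    stepA st o = st ++ [o] := by
  unfold stepA
  split_ifs <;> simp_all

-- an opener followed by its closer cancels
lemma step_pair (st : List Char) (a b : Char)
    (h : (a, b) = ('[', ']') ∨ (a, b) = ('{', '}') ∨ (a, b) = ('(', ')')) :
    stepA (stepA st a) b = st := by
  rcases h with h | h | h <;>
    (injection h with h1 h2; subst h1; subst h2) <;>
    rw [step_push st _ (by decide) (by decide) (by decide)] <;>
    (unfold stepA; split_ifs <;> simp_all)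

-- deleting matched pairs does not change the stack scan
lemma foldl_replacePair (a b : Char)
    (h : (a, b) = ('[', ']') ∨ (a, b) = ('{', '}') ∨ (a, b) = ('(', ')')) :
    ∀ (t st : List Char), (replacePair a b t).foldl stepA st = t.foldl stepA st := by
  intro t
  induction t using replacePair.induct a b with
  | case1 => intro st; simp [replacePair]
  | case2 x => intro st; simp [replacePair]
  | case3 x y rest hxy ih =>
    intro st
    obtain ⟨hx, hy⟩ := hxy
    subst hx; subst hy
    have hrw : replacePair x y (x :: y :: rest) = replacePair x y rest := by
      simp [replacePair]
    rw [hrw, ih]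
    simp only [List.foldl]
    rw [step_pair st x y h]
  | case4 x y rest hxy ih =>
    intro st
    simp only [replacePair, if_neg hxy]
    simp only [List.foldl]
    exact ih (stepA st x)

lemma foldl_reduce3 (t st : List Char) :
    (reduce3 t).foldl stepA st = t.foldl stepA st := by
  unfold reduce3
  rw [foldl_replacePair '(' ')' (by simp), foldl_replacePair '{' '}' (by simp),
      foldl_replacePair '[' ']' (by simp)]

lemma foldl_reduceLoop (f : Nat) : ∀ (t st : List Char),
    (reduceLoop f t).foldl stepA st = t.foldl stepA st := by
  induction f with
  | zero => intro t st; rfl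
  | succ f ih =>
    intro t st
    unfold reduceLoop
    split
    · rw [ih, foldl_reduce3]
    · rfl

lemma hasPair2_cons (a b x y : Char) (r : List Char)
    (h : hasPair2 a b (y :: r) = true) : hasPair2 a b (x :: y :: r) = true := by
  unfold hasPair2
  split
  · rfl
  · exact h

lemma hasPair2_head (a b : Char) (v : List Char) :
    hasPair2 a b (a :: b :: v) = true := by
  unfold hasPair2
  rw [if_pos ⟨rfl, rfl⟩]

-- a matched pair somewhere in the list is found by hasPair2
lemma hasPair2_append (a b : Char) (u v : List Char) :
    hasPair2 a b (u ++ a :: b :: v) = true := by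
  induction u with
  | nil => exact hasPair2_head a b v
  | cons x xs ih =>
    cases xs with
    | nil => exact hasPair2_cons a b x a _ (hasPair2_head a b v)
    | cons y ys => exact hasPair2_cons a b x y _ ih

-- scanning a pair-free suffix just appends it
lemma foldl_irreducible : ∀ (t st : List Char), hasAny (st ++ t) = false →
    t.foldl stepA st = st ++ t := by
  intro t
  induction t with
  | nil => intro st _; simp
  | cons j rest ih =>
    intro st h
    have hstep : stepA st j = st ++ [j] := by
      unfold stepA
      rcases st.eq_nil_or_concat with hnil | ⟨st', o, rfl⟩
      · subst hnil; simp
      · simp only [List.concat_eq_append] at h ⊢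
        have hne : st' ++ [o] ≠ [] := by simp
        rw [if_pos hne]
        have hlast : (st' ++ [o]).getLast? = some o := by simp
        split_ifs with h1 h2 h3
        · exfalso
          obtain ⟨ho, hj⟩ := h1
          rw [hlast] at ho; injection ho with ho
          subst ho; subst hj
          simp [hasAny, hasPair2_append] at h
        · exfalso
          obtain ⟨ho, hj⟩ := h2
          rw [hlast] at ho; injection ho with ho
          subst ho; subst hj
          simp [hasAny, hasPair2_append] at h
        · exfalso
          obtain ⟨ho, hj⟩ := h3
          rw [hlast] at ho; injection ho with ho
          subst ho; subst hj
          simp [hasAny, hasPair2_append] at h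
        · rfl
    simp only [List.foldl, hstep]
    rw [ih (st ++ [j]) (by simpa using h)]
    simp

lemma replacePair_length_le (a b : Char) : ∀ t : List Char,
    (replacePair a b t).length ≤ t.length := by
  intro t
  induction t using replacePair.induct a b with
  | case1 => simp [replacePair]
  | case2 x => simp [replacePair]
  | case3 x y rest hxy ih =>
    simp only [replacePair, if_pos hxy, List.length_cons]; omega
  | case4 x y rest hxy ih =>
    simp only [replacePair, if_neg hxy, List.length_cons] at *; omega

lemma replacePair_id_of_no (a b : Char) : ∀ t : List Char,
    hasPair2 a b t = false → replacePair a b t = t := by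
  intro t
  induction t using replacePair.induct a b with
  | case1 => intro _; rfl
  | case2 x => intro _; rfl
  | case3 x y rest hxy ih =>
    intro h; exfalso; simp [hasPair2, if_pos hxy] at h
  | case4 x y rest hxy ih =>
    intro h
    simp only [replacePair, if_neg hxy]
    rw [ih (by simpa [hasPair2, if_neg hxy] using h)]

lemma replacePair_length_lt (a b : Char) : ∀ t : List Char,
    hasPair2 a b t = true → (replacePair a b t).length < t.length := by
  intro t
  induction t using replacePair.induct a b with
  | case1 => intro h; simp [hasPair2] at h
  | case2 x => intro h; simp [hasPair2] at h
  | case3 x y rest hxy ih =>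
    intro _
    simp only [replacePair, if_pos hxy, List.length_cons]
    have := replacePair_length_le a b rest
    omega
  | case4 x y rest hxy ih =>
    intro h
    have h' : hasPair2 a b (y :: rest) = true := by
      simpa [hasPair2, if_neg hxy] using h
    have := ih h'
    simp only [replacePair, if_neg hxy, List.length_cons] at *
    omega

lemma reduce3_length_lt (t : List Char) (h : hasAny t = true) :
    (reduce3 t).length < t.length := by
  unfold reduce3
  unfold hasAny at h
  by_cases h1 : hasPair2 '[' ']' t = true
  · calc (replacePair '(' ')' (replacePair '{' '}' (replacePair '[' ']' t))).length
        ≤ (replacePair '{' '}' (replacePair '[' ']' t)).length := replacePair_length_le _ _ _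
      _ ≤ (replacePair '[' ']' t).length := replacePair_length_le _ _ _
      _ < t.length := replacePair_length_lt _ _ _ h1
  · rw [replacePair_id_of_no '[' ']' t (by simpa using h1)]
    by_cases h2 : hasPair2 '{' '}' t = true
    · calc (replacePair '(' ')' (replacePair '{' '}' t)).length
          ≤ (replacePair '{' '}' t).length := replacePair_length_le _ _ _
        _ < t.length := replacePair_length_lt _ _ _ h2
    · rw [replacePair_id_of_no '{' '}' t (by simpa using h2)]
      have h3 : hasPair2 '(' ')' t = true := by
        simp only [Bool.or_eq_true] at h
        rcases h with (h | h) | h <;> simp_all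
      exact replacePair_length_lt _ _ _ h3

lemma reduceLoop_irreducible : ∀ (f : Nat) (t : List Char), t.length ≤ f →
    hasAny (reduceLoop f t) = false := by
  intro f
  induction f with
  | zero =>
    intro t h
    have : t = [] := List.eq_nil_of_length_eq_zero (by omega)
    subst this; rfl
  | succ f ih =>
    intro t h
    unfold reduceLoop
    by_cases hp : hasAny t = true
    · rw [if_pos hp]
      exact ih _ (by have := reduce3_length_lt t hp; omega)
    · rw [if_neg hp]
      simpa using hp

-- per-rotation: B's elimination judges exactly as A's stack
lemma valid_iff (t : List Char) :
    (t.foldl stepA [] = []) ↔ (reduceLoop t.length t = []) := by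
  set r := reduceLoop t.length t with hr
  have h1 : r.foldl stepA [] = t.foldl stepA [] := foldl_reduceLoop _ _ _
  have h2 : hasAny r = false := reduceLoop_irreducible _ _ le_rfl
  have h3 : r.foldl stepA [] = r := by
    have := foldl_irreducible r [] (by simpa using h2)
    simpa using this
  constructor
  · intro h; rw [← h, ← h1, h3]
  · intro h; rw [← h1, h3, h]

-- rotation powers coincide with slicing
lemma rotA_iter (l : List Char) : ∀ i, i ≤ l.length →
    rotA^[i] l = l.drop i ++ l.take i := by
  intro i
  induction i with
  | zero => intro _; simp
  | succ i ih =>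
    intro h
    rw [Function.iterate_succ_apply', ih (by omega)]
    have hi : i < l.length := by omega
    have hd : l.drop i = l[i] :: l.drop (i + 1) := List.drop_eq_getElem_cons hi
    rw [hd]
    show (l.drop (i + 1) ++ l.take i) ++ [l[i]] = l.drop (i + 1) ++ l.take (i + 1)
    rw [List.append_assoc, List.take_add_one]
    simp [hi]

lemma rotA_iter_full (l : List Char) : rotA^[l.length] l = l := by
  rw [rotA_iter l l.length le_rfl]; simp

-- indicator for a rotation
def indA (l : List Char) (i : Nat) : Int :=
  if (rotA^[i] l).foldl stepA [] = [] then 1 else 0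

-- A's fold computes (rotated deque, sum of indicators at rotations 1..k)
lemma solutionA_fold (l : List Char) : ∀ k : Nat,
    (List.range k).foldl
      (fun (st : List Char × Int) (_ : Nat) =>
        let d := rotA st.1
        let a := d.foldl stepA ([] : List Char)
        (d, if a.length = 0 then st.2 + 1 else st.2))
      (l, 0)
    = (rotA^[k] l, ∑ i ∈ Finset.range k, indA l (i + 1)) := by
  intro k
  induction k with
  | zero => simp
  | succ k ih =>
    rw [List.range_succ, List.foldl_append, ih]
    simp only [List.foldl]
    rw [Finset.sum_range_succ]
    have hrot : rotA^[k + 1] l = rotA (rotA^[k] l) := Function.iterate_succ_apply' rotA k l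
    have hind : indA l (k + 1)
        = if (rotA (rotA^[k] l)).foldl stepA [] = [] then (1 : Int) else 0 := by
      unfold indA
      rw [hrot]
    rw [hrot, hind]
    by_cases hc : (rotA (rotA^[k] l)).foldl stepA [] = []
    · simp [hc]
    · simp [hc]

-- B's fold computes the sum of indicators at rotations 0..k-1
lemma solutionB_fold (l : List Char) : ∀ k : Nat, k ≤ l.length →
    (List.range k).foldl
      (fun (answer : Int) (i : Nat) =>
        let t := l.drop i ++ l.take i
        let r := reduceLoop t.length t
        if r = [] then answer + 1 else answer)
      0
    = ∑ i ∈ Finset.range k, indA l i := by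
  intro k
  induction k with
  | zero => intro _; simp
  | succ k ih =>
    intro h
    rw [List.range_succ, List.foldl_append, ih (by omega)]
    simp only [List.foldl]
    rw [Finset.sum_range_succ]
    have hind : indA l k
        = if reduceLoop (l.drop k ++ l.take k).length (l.drop k ++ l.take k) = []
          then (1 : Int) else 0 := by
      unfold indA
      simp only [rotA_iter l k (by omega : k ≤ l.length), valid_iff]
    rw [hind]
    split <;> simp

-- reindexing: the sums over rotations 1..n and 0..n-1 agree since rot^n = rot^0
lemma sum_shift (l : List Char) :
    ∑ i ∈ Finset.range l.length, indA l (i + 1) = ∑ i ∈ Finset.range l.length, indA l i := by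
  have h0 : indA l l.length = indA l 0 := by
    unfold indA; rw [rotA_iter_full]; simp
  have h1 := Finset.sum_range_succ (fun i => indA l i) l.length
  have h2 := Finset.sum_range_succ' (fun i => indA l i) l.length
  simp only at h1 h2
  rw [h0] at h1
  linarith [h1.symm.trans h2]

-- ===== VERDICT (by name: the statement is the Claim_ definition above) =====
theorem solution_spec : Claim_equal_solution := by
  intro s _
  unfold Spec_solution solution solution_alt
  simp only
  rw [solutionA_fold s.toList s.toList.length,
      solutionB_fold s.toList s.toList.length le_rfl]
  exact sum_shift s.toList
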